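-- pv_equiv track=rewrite | github.com/bsnacks000/sortdicom | sortdicom/processor.py | _label_duplicates
-- ===== SOURCE A (Python) =====
-- from collections import OrderedDict
--
-- def _label_duplicates(ordered_dict):
--     """ takes an ordered dict and sorts the key value pairs. It checks
--     for duplicates within small groups
--     """
--     # sort the key value pairs so that duplicates line up
--     fname_tuples = sorted(ordered_dict.items(), key=lambda x:x[1])
--     fname_lists = [list(f) for f in fname_tuples]
--
--     current_candidate_duplicate = fname_lists[0][1] # start with the first one
--     counter = 1
--     for i, row in enumerate(fname_lists):
--         if row[1] == current_candidate_duplicate: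
--             row[1] = row[1].replace('.dcm', '_{}.dcm'.format(counter))  # append counter
--             counter += 1  #increment
--         else:
--             counter = 1  # reset the counter
--             current_candidate_duplicate = row[1] # set the new duplicate candidate
--             row[1] = row[1].replace('.dcm', '_{}.dcm'.format(counter))
--             counter += 1
--
--     return OrderedDict(fname_lists)
-- ===== SOURCE B (Python) =====
-- from collections import OrderedDict
--
--
-- def _label_duplicates(ordered_dict):
--     """Bucket the keys by value in a dict (one hash pass), then walk only the
--     DISTINCT values in sorted order, numbering each bucket's keys 1..n.
--     Ties keep dict insertion order, which is exactly what the stable full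
--     sort of the original produces; only the distinct values get sorted.
--     """
--     buckets = {}
--     for key, value in ordered_dict.items():
--         buckets.setdefault(value, []).append(key)
--     labeled = [(key, value.replace('.dcm', '_{}.dcm'.format(i)))
--                for value in sorted(buckets)
--                for i, key in enumerate(buckets[value], 1)]
--     return OrderedDict(labeled)
-- ===== Notes on version B (the rewrite author's own statement) =====
-- stated objective: alternative
-- what changed: Replaced the full stable sort of all items followed by a sequential candidate/counter state machine with hash bucketing of the keys per value, sorting only the DISTINCT values and numbering each bucket's keys 1..n.
import Mathlib
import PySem

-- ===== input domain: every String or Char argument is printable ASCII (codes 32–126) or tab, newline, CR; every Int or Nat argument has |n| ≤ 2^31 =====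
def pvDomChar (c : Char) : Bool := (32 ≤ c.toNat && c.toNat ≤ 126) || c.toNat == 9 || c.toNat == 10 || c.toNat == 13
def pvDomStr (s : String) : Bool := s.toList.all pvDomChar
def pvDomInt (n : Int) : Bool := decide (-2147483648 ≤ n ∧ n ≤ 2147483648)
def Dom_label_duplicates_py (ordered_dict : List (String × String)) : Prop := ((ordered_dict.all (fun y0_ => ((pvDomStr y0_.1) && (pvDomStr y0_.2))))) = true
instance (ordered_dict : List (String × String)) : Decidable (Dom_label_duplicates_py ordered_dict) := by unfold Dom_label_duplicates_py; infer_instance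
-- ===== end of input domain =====

-- B replaces A's sort-everything + sequential candidate/counter state machine by hash
-- bucketing of the keys per value, sorting only the DISTINCT values and numbering each
-- bucket 1..n; return-value equivalence only (A mutates its private list-of-lists).

-- shared formatting helper: v.replace('.dcm', '_{k}.dcm')
def pvLab (v : String) (k : Int) : String :=
  PySem.Str.replace v ".dcm" ("_" ++ PySem.Int.toStr k ++ ".dcm")

-- ===== PORT A =====
-- A's loop body: state = (current_candidate_duplicate, counter, rows emitted so far)
def pvStepA (st : String × Int × List (String × String)) (irow : Int × (String × String)) :
    String × Int × List (String × String) :=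
  let row := irow.2
  if row.2 == st.1 then
    (st.1, st.2.1 + 1, st.2.2 ++ [(row.1, pvLab row.2 st.2.1)])
  else
    (row.2, (2 : Int), st.2.2 ++ [(row.1, pvLab row.2 1)])

def label_duplicates_py (ordered_dict : List (String × String)) : List (String × String) :=
  let fname_tuples := PySem.List.sorted (PySem.Dict.ofList ordered_dict).items (fun x => x.2) false
  match fname_tuples with
  | [] => []  -- Python: fname_lists[0] raises IndexError here (excluded by Pre_)
  | x :: _ =>
    -- current_candidate_duplicate = first value, counter = 1; loop over enumerate
    let r := (PySem.List.enumerate fname_tuples 0).foldl pvStepA (x.2, (1 : Int), ([] : List (String × String)))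
    (PySem.Dict.ofList r.2.2).items

-- ===== PORT B =====
-- inner comprehension clause: [(key, value.replace(...)) for i, key in enumerate(bucket, 1)]
def pvLabKeys (v : String) (ks : List String) : List (String × String) :=
  (PySem.List.enumerate ks 1).map (fun p => (p.2, pvLab v p.1))

def label_duplicates_py_alt (ordered_dict : List (String × String)) : List (String × String) :=
  let items := (PySem.Dict.ofList ordered_dict).items
  -- buckets.setdefault(value, []).append(key)  =  buckets[value] = buckets.get(value, []) + [key]
  let buckets := items.foldl (fun d p => d.modify p.2 [] (fun l => l ++ [p.1])) PySem.Dict.empty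
  let vals := PySem.List.sorted buckets.keys (fun v => v) false
  (PySem.Dict.ofList (vals.flatMap (fun v => pvLabKeys v (buckets.getD v [])))).items

-- ===== PRECONDITION & SPEC =====
-- A raises IndexError on an empty dict (fname_lists[0]); Pre_ excludes exactly that input.
def Pre_label_duplicates_py (ordered_dict : List (String × String)) : Prop := ordered_dict ≠ []
instance (ordered_dict : List (String × String)) : Decidable (Pre_label_duplicates_py ordered_dict) := by unfold Pre_label_duplicates_py; infer_instance
def pvWitness_label_duplicates_py : (List (String × String)) := [("a", "x.dcm"), ("b", "x.dcm")]

def Spec_label_duplicates_py (ordered_dict : List (String × String)) (out : List (String × String)) : Prop := out = label_duplicates_py_alt ordered_dict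
instance (ordered_dict : List (String × String)) (out : List (String × String)) : Decidable (Spec_label_duplicates_py ordered_dict out) := by unfold Spec_label_duplicates_py; infer_instance

-- ===== CLAIM (what is proved, stated in full; the proofs are below) =====
def Claim_equal_label_duplicates_py : Prop := ∀ (ordered_dict : List (String × String)), Dom_label_duplicates_py ordered_dict → Pre_label_duplicates_py ordered_dict → Spec_label_duplicates_py ordered_dict (label_duplicates_py ordered_dict)

-- ===== LEMMAS AND PROOFS =====

-- ---- run decomposition of a list (proof helper: A's loop labels maximal runs) ----
def pvTakeRun (v : String) : List (String × String) → List (String × String) × List (String × String)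
  | [] => ([], [])
  | x :: xs =>
    if x.2 == v then
      let p := pvTakeRun v xs
      (x :: p.1, p.2)
    else ([], x :: xs)

theorem pvTakeRun_snd_length (v : String) (xs : List (String × String)) :
    (pvTakeRun v xs).2.length ≤ xs.length := by
  induction xs with
  | nil => simp [pvTakeRun]
  | cons x xs ih =>
    simp only [pvTakeRun]
    split
    · exact Nat.le_succ_of_le ih
    · simp

def pvGroupRuns : List (String × String) → List (List (String × String))
  | [] => []
  | x :: xs => (x :: (pvTakeRun x.2 xs).1) :: pvGroupRuns (pvTakeRun x.2 xs).2
  termination_by xs => xs.length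
  decreasing_by
    exact Nat.lt_succ_of_le (pvTakeRun_snd_length _ _)

def pvLabelGroup (g : List (String × String)) : List (String × String) :=
  (PySem.List.enumerate g 1).map (fun p => (p.2.1, pvLab p.2.2 p.1))

def pvGLabel (xs : List (String × String)) : List (String × String) :=
  (pvGroupRuns xs).flatMap pvLabelGroup

theorem pvGroupRuns_nil : pvGroupRuns [] = [] := by
  simp [pvGroupRuns]

theorem pvGroupRuns_cons (x : String × String) (xs : List (String × String)) :
    pvGroupRuns (x :: xs) = (x :: (pvTakeRun x.2 xs).1) :: pvGroupRuns (pvTakeRun x.2 xs).2 := by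
  simp [pvGroupRuns]

theorem pvTakeRun_append (v : String) (xs : List (String × String)) :
    (pvTakeRun v xs).1 ++ (pvTakeRun v xs).2 = xs := by
  induction xs with
  | nil => simp [pvTakeRun]
  | cons x xs ih =>
    simp only [pvTakeRun]
    split
    · simpa using ih
    · simp

theorem pvTakeRun_fst_all (v : String) (xs : List (String × String)) :
    ∀ y ∈ (pvTakeRun v xs).1, y.2 = v := by
  induction xs with
  | nil => simp [pvTakeRun]
  | cons x xs ih =>
    simp only [pvTakeRun]
    split
    · next h =>
      intro y hy
      rcases List.mem_cons.mp hy with rfl | hy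
      · exact beq_iff_eq.mp h
      · exact ih y hy
    · simp

theorem pvTakeRun_snd_cases (v : String) (xs : List (String × String)) :
    (pvTakeRun v xs).2 = [] ∨ ∃ z zs, (pvTakeRun v xs).2 = z :: zs ∧ z.2 ≠ v := by
  induction xs with
  | nil => simp [pvTakeRun]
  | cons x xs ih =>
    simp only [pvTakeRun]
    split
    · exact ih
    · next h => exact Or.inr ⟨x, xs, rfl, by simpa using h⟩

-- ---- A's loop semantics as a recursion ----
def pvLabelCont (v : String) (k : Int) : List (String × String) → List (String × String)
  | [] => []
  | r :: rs =>
    if r.2 == v then (r.1, pvLab r.2 k) :: pvLabelCont v (k + 1) rs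
    else (r.1, pvLab r.2 1) :: pvLabelCont r.2 2 rs

theorem pvFoldl_eq_labelCont (rows : List (String × String)) :
    ∀ (i : Int) (v : String) (k : Int) (acc : List (String × String)),
    ((PySem.List.enumerate rows i).foldl pvStepA (v, k, acc)).2.2 = acc ++ pvLabelCont v k rows := by
  induction rows with
  | nil => intro i v k acc; simp [PySem.List.enumerate_nil, pvLabelCont]
  | cons r rs ih =>
    intro i v k acc
    rw [PySem.List.enumerate_cons, List.foldl_cons]
    by_cases h : r.2 == v
    · rw [show pvStepA (v, k, acc) (i, r) = (v, k + 1, acc ++ [(r.1, pvLab r.2 k)]) from by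
        simp [pvStepA, h]]
      rw [ih (i + 1) v (k + 1)]
      simp [pvLabelCont, h]
    · rw [show pvStepA (v, k, acc) (i, r) = (r.2, (2 : Int), acc ++ [(r.1, pvLab r.2 1)]) from by
        simp [pvStepA, h]]
      rw [ih (i + 1) r.2 2]
      simp [pvLabelCont, h]

theorem pvLabelCont_eq_run (xs : List (String × String)) :
    ∀ (v : String) (k : Int),
    pvLabelCont v k xs =
      (PySem.List.enumerate (pvTakeRun v xs).1 k).map (fun p => (p.2.1, pvLab p.2.2 p.1))
        ++ pvGLabel (pvTakeRun v xs).2 := by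
  induction xs with
  | nil =>
    intro v k
    simp [pvTakeRun, pvLabelCont, pvGLabel, pvGroupRuns_nil, PySem.List.enumerate_nil]
  | cons x xs ih =>
    intro v k
    by_cases h : x.2 == v
    · have h1 : pvLabelCont v k (x :: xs) = (x.1, pvLab x.2 k) :: pvLabelCont v (k + 1) xs := by
        simp [pvLabelCont, h]
      have h2 : pvTakeRun v (x :: xs) = (x :: (pvTakeRun v xs).1, (pvTakeRun v xs).2) := by
        simp [pvTakeRun, h]
      rw [h1, h2, ih v (k + 1), PySem.List.enumerate_cons]
      simp
    · have h1 : pvLabelCont v k (x :: xs) = (x.1, pvLab x.2 1) :: pvLabelCont x.2 2 xs := by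
        simp [pvLabelCont, h]
      have h2 : pvTakeRun v (x :: xs) = ([], x :: xs) := by
        simp [pvTakeRun, h]
      rw [h1, h2, ih x.2 2]
      simp [pvGLabel, pvGroupRuns_cons, pvLabelGroup, PySem.List.enumerate_cons,
        PySem.List.enumerate_nil]

theorem pvLabelCont_head (x : String × String) (xs : List (String × String)) :
    pvLabelCont x.2 1 (x :: xs) = pvGLabel (x :: xs) := by
  have h2 : pvTakeRun x.2 (x :: xs) = (x :: (pvTakeRun x.2 xs).1, (pvTakeRun x.2 xs).2) := by
    simp [pvTakeRun]
  rw [pvLabelCont_eq_run, h2]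
  simp [pvGLabel, pvGroupRuns_cons, pvLabelGroup, PySem.List.enumerate_cons]

-- ---- labelling a constant-value group is labelling its keys ----
theorem pvLabelGroup_eq_labKeys (v : String) (g : List (String × String))
    (h : ∀ y ∈ g, y.2 = v) : pvLabelGroup g = pvLabKeys v (g.map (fun p => p.1)) := by
  unfold pvLabelGroup pvLabKeys
  suffices H : ∀ (k : Int),
      (PySem.List.enumerate g k).map (fun p => (p.2.1, pvLab p.2.2 p.1)) =
      (PySem.List.enumerate (g.map (fun p => p.1)) k).map (fun p => (p.2, pvLab v p.1)) from H 1
  induction g with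
  | nil => intro k; simp [PySem.List.enumerate_nil]
  | cons y g ih =>
    intro k
    rw [List.map_cons, PySem.List.enumerate_cons, PySem.List.enumerate_cons]
    have hy : y.2 = v := h y (by simp)
    rw [List.map_cons, List.map_cons, ih (fun z hz => h z (by simp [hz])) (k + 1)]
    simp [hy]

-- ---- dedup through a leading constant run ----
theorem pvAdd_cons_of_ne {v x : String} (s : List String) (h : x ≠ v) :
    PySem.Set.add (v :: s) x = v :: PySem.Set.add s x := by
  rw [PySem.Set.add_eq_ite, PySem.Set.add_eq_ite]
  by_cases hm : x ∈ s
  · simp [hm, List.mem_cons]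
  · simp [hm, List.mem_cons, h]

theorem pvFoldl_add_cons_of_not_mem {v : String} (l : List String) :
    ∀ (s : List String), v ∉ l →
    l.foldl PySem.Set.add (v :: s) = v :: l.foldl PySem.Set.add s := by
  induction l with
  | nil => intro s _; rfl
  | cons x l ih =>
    intro s hv
    have hx : x ≠ v := fun h => hv (by simp [h])
    rw [List.foldl_cons, List.foldl_cons, pvAdd_cons_of_ne s hx]
    · exact ih _ (fun h => hv (by simp [h]))

theorem pvDedup_run (v : String) (l1 l2 : List String)
    (h1 : ∀ y ∈ l1, y = v) (h2 : v ∉ l2) :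
    PySem.List.dedup (v :: (l1 ++ l2)) = v :: PySem.List.dedup l2 := by
  have hof : ∀ (xs : List String), PySem.List.dedup xs = xs.foldl PySem.Set.add [] := by
    intro xs; rw [PySem.List.dedup_eq_ofList, PySem.Set.ofList_eq_foldl]
  rw [hof, hof]
  rw [List.foldl_cons, List.foldl_append]
  have hadd : PySem.Set.add ([] : List String) v = [v] := by
    simp [PySem.Set.add]
  rw [hadd]
  have hl1 : l1.foldl PySem.Set.add [v] = [v] := by
    induction l1 with
    | nil => rfl
    | cons y l ih =>
      have hy : y = v := h1 y (by simp)
      rw [List.foldl_cons, hy, show PySem.Set.add [v] v = [v] from by simp [PySem.Set.add]]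
      exact ih (fun z hz => h1 z (by simp [hz]))
  rw [hl1]
  exact pvFoldl_add_cons_of_not_mem l2 [] h2

-- ---- dedup (= set(xs), first occurrences) is a sublist of xs ----
theorem pvDedup_sublist (xs : List String) : List.Sublist (PySem.List.dedup xs) xs := by
  induction xs using List.reverseRecOn with
  | nil => simp [PySem.List.dedup_eq_ofList, PySem.Set.ofList_nil]
  | append_singleton xs x ih =>
    rw [PySem.List.dedup_eq_ofList, PySem.Set.ofList_append_singleton, PySem.Set.add_eq_ite]
    rw [PySem.List.dedup_eq_ofList] at ih
    split
    · exact ih.trans (List.sublist_append_left xs [x])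
    · exact List.Sublist.append ih (List.Sublist.refl [x])

-- ---- stability of the sort: filtering one value commutes with sorting by value ----
theorem pvInsertBy_filter_ne (bef : (String × String) → (String × String) → Bool)
    (x : String × String) (v : String) (hx : x.2 ≠ v) (ys : List (String × String)) :
    (PySem.List.insertBy bef x ys).filter (fun a => a.2 == v) =
      ys.filter (fun a => a.2 == v) := by
  induction ys with
  | nil => simp [PySem.List.insertBy, hx]
  | cons y ys ih =>
    simp only [PySem.List.insertBy]
    split
    · simp [List.filter_cons, hx]
    · rw [List.filter_cons, List.filter_cons, ih]

theorem pvInsertBy_filter_eq (x : String × String) (ys : List (String × String))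
    (hs : ys.Pairwise (fun a b => a.2 ≤ b.2)) :
    (PySem.List.insertBy (fun a b => decide (a.2 < b.2)) x ys).filter (fun a => a.2 == x.2) =
      ys.filter (fun a => a.2 == x.2) ++ [x] := by
  induction ys with
  | nil => simp [PySem.List.insertBy]
  | cons y ys ih =>
    simp only [PySem.List.insertBy]
    split
    · next h =>
      have hlt : x.2 < y.2 := of_decide_eq_true h
      have hnone : (y :: ys).filter (fun a => a.2 == x.2) = [] := by
        rw [List.filter_eq_nil_iff]
        intro a ha
        rcases List.mem_cons.mp ha with rfl | ha
        · simp [ne_of_gt hlt]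
        · have h1 : y.2 ≤ a.2 := (List.pairwise_cons.mp hs).1 a ha
          simp [ne_of_gt (lt_of_lt_of_le hlt h1)]
      have hhead : List.filter (fun a => a.2 == x.2) (x :: y :: ys) =
          x :: List.filter (fun a => a.2 == x.2) (y :: ys) := by
        rw [List.filter_cons]; simp
      rw [hhead, hnone]
      rfl
    · have ih' := ih (List.pairwise_cons.mp hs).2
      rw [List.filter_cons, List.filter_cons, ih']
      by_cases hy : (y.2 == x.2) = true
      · rw [if_pos hy, if_pos hy]
        rfl
      · rw [if_neg hy, if_neg hy]

theorem pvSorted_filter_stable (xs : List (String × String)) (v : String) :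
    (PySem.List.sorted xs (fun p => p.2) false).filter (fun a => a.2 == v) =
      xs.filter (fun a => a.2 == v) := by
  induction xs using List.reverseRecOn with
  | nil => simp [PySem.List.sorted_eq_foldl_insertBy]
  | append_singleton xs x ih =>
    have hstep : PySem.List.sorted (xs ++ [x]) (fun p => p.2) false =
        PySem.List.insertBy (fun a b => decide (a.2 < b.2)) x
          (PySem.List.sorted xs (fun p => p.2) false) := by
      rw [PySem.List.sorted_eq_foldl_insertBy, PySem.List.sorted_eq_foldl_insertBy,
        List.foldl_append]
      rfl
    rw [hstep]
    by_cases hx : x.2 = v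
    · subst hx
      rw [pvInsertBy_filter_eq x _ (PySem.List.sorted_pairwise xs (fun p => p.2)), ih]
      simp [List.filter_append]
    · rw [pvInsertBy_filter_ne _ x v hx, ih]
      simp [List.filter_append, hx]

-- ---- the run labelling of a value-sorted list, as a flatMap over its distinct values ----
theorem pvGLabel_sorted_aux : ∀ (n : Nat) (s : List (String × String)), s.length ≤ n →
    s.Pairwise (fun a b => a.2 ≤ b.2) →
    pvGLabel s = (PySem.List.dedup (s.map (fun p => p.2))).flatMap
      (fun v => pvLabKeys v ((s.filter (fun p => p.2 == v)).map (fun p => p.1))) := by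
  intro n
  induction n with
  | zero =>
    intro s hlen _
    have : s = [] := List.eq_nil_of_length_eq_zero (Nat.le_zero.mp hlen)
    subst this
    simp [pvGLabel, pvGroupRuns_nil, PySem.List.dedup_eq_ofList, PySem.Set.ofList_nil]
  | succ n ih =>
    intro s hlen hp
    match s with
    | [] => simp [pvGLabel, pvGroupRuns_nil, PySem.List.dedup_eq_ofList, PySem.Set.ofList_nil]
    | x :: xs =>
      set r := (pvTakeRun x.2 xs).1 with hr
      set t := (pvTakeRun x.2 xs).2 with ht
      have hsplit : r ++ t = xs := pvTakeRun_append x.2 xs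
      have hrall : ∀ y ∈ r, y.2 = x.2 := pvTakeRun_fst_all x.2 xs
      -- every element of t has value ≠ x.2
      have hxall : ∀ y ∈ xs, x.2 ≤ y.2 := (List.pairwise_cons.mp hp).1
      have hpxs : xs.Pairwise (fun a b => a.2 ≤ b.2) := (List.pairwise_cons.mp hp).2
      have hpt : t.Pairwise (fun a b => a.2 ≤ b.2) := by
        have : List.Sublist t xs := hsplit ▸ List.sublist_append_right r t
        exact List.Pairwise.sublist this hpxs
      have htall : ∀ y ∈ t, y.2 ≠ x.2 := by
        rcases pvTakeRun_snd_cases x.2 xs with hnil | ⟨z, zs, hzt, hz⟩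
        · rw [← ht] at hnil; rw [hnil]; intro y hy; cases hy
        · rw [← ht] at hzt
          intro y hy
          rw [hzt] at hy hpt
          have hzx : x.2 < z.2 := by
            have hzt' : z ∈ t := by rw [hzt]; simp
            have hzmem : z ∈ xs := by rw [← hsplit]; exact List.mem_append.mpr (Or.inr hzt')
            exact lt_of_le_of_ne (hxall z hzmem) (fun h => hz h.symm)
          rcases List.mem_cons.mp hy with rfl | hy
          · exact fun h => hz h
          · have : z.2 ≤ y.2 := (List.pairwise_cons.mp hpt).1 y hy
            exact fun h => absurd (h ▸ lt_of_lt_of_le hzx this) (lt_irrefl _)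
      -- the values list decomposes
      have hmap : (x :: xs).map (fun p => p.2) = x.2 :: (r.map (fun p => p.2) ++ t.map (fun p => p.2)) := by
        rw [List.map_cons, ← hsplit, List.map_append]
      have hded : PySem.List.dedup ((x :: xs).map (fun p => p.2)) =
          x.2 :: PySem.List.dedup (t.map (fun p => p.2)) := by
        rw [hmap]
        refine pvDedup_run x.2 _ _ (fun y hy => ?_) (fun hmem => ?_)
        · rcases List.mem_map.mp hy with ⟨p, hp', rfl⟩; exact hrall p hp'
        · rcases List.mem_map.mp hmem with ⟨p, hp', hpv⟩; exact htall p hp' hpv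
      -- the filter at x.2 is the leading run
      have hfilt_run : (x :: xs).filter (fun p => p.2 == x.2) = x :: r := by
        rw [← hsplit]
        show List.filter (fun p => p.2 == x.2) (x :: (r ++ t)) = x :: r
        rw [List.filter_cons]
        simp only [beq_self_eq_true, decide_true, if_pos]
        rw [List.filter_append]
        rw [List.filter_eq_self.mpr (fun a ha => by simp [hrall a ha]),
          List.filter_eq_nil_iff.mpr (fun a ha => by simp [htall a ha])]
        simp
      -- filters at other distinct values skip x and the run
      have hfilt_t : ∀ v ∈ PySem.List.dedup (t.map (fun p => p.2)),
          (x :: xs).filter (fun p => p.2 == v) = t.filter (fun p => p.2 == v) := by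
        intro v hv
        have hvmem : v ∈ t.map (fun p => p.2) := by
          rw [PySem.List.dedup_eq_ofList] at hv; exact (PySem.Set.mem_ofList _ _).mp hv
        rcases List.mem_map.mp hvmem with ⟨p, hp', rfl⟩
        have hvx : p.2 ≠ x.2 := htall p hp'
        rw [← hsplit]
        show List.filter (fun q => q.2 == p.2) (x :: (r ++ t)) = List.filter (fun q => q.2 == p.2) t
        have hxp : ¬ ((x.2 == p.2) = true) := by
          simp only [beq_iff_eq]
          exact fun h => hvx h.symm
        rw [List.filter_cons, if_neg hxp, List.filter_append,
          List.filter_eq_nil_iff.mpr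
            (fun a ha h => hvx ((beq_iff_eq.mp h).symm.trans (hrall a ha)))]
        simp
      -- put it together
      unfold pvGLabel
      rw [pvGroupRuns_cons, List.flatMap_cons, hded, List.flatMap_cons]
      rw [← hr, ← ht]
      have hihlen : t.length ≤ n := by
        have h1 : t.length ≤ xs.length := pvTakeRun_snd_length x.2 xs
        have h2 : xs.length ≤ n := by simpa using Nat.le_of_succ_le_succ hlen
        exact le_trans h1 h2
      have hih : (pvGroupRuns t).flatMap pvLabelGroup =
          (PySem.List.dedup (t.map (fun p => p.2))).flatMap
            (fun v => pvLabKeys v ((t.filter (fun p => p.2 == v)).map (fun p => p.1))) :=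
        ih t hihlen hpt
      rw [hih]
      congr 1
      · rw [hfilt_run]
        exact pvLabelGroup_eq_labKeys x.2 (x :: r)
          (fun y hy => by rcases List.mem_cons.mp hy with rfl | hy; rfl; exact hrall y hy)
      · exact (List.flatMap_congr (fun v hv => by rw [hfilt_t v hv])).symm

-- ---- B's bucket dict, characterized ----
theorem pvBuckets_getD (items : List (String × String)) (v : String) :
    (items.foldl (fun d p => d.modify p.2 [] (fun l => l ++ [p.1])) PySem.Dict.empty).getD v [] =
      (items.filter (fun p => p.2 == v)).map (fun p => p.1) := by
  have hswap : items.foldl (fun d p => d.modify p.2 [] (fun l => l ++ [p.1])) PySem.Dict.empty =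
      (items.map (fun p => (p.2, p.1))).foldl
        (fun d p => d.modify p.1 [] (fun l => l ++ [p.2])) PySem.Dict.empty := by
    rw [List.foldl_map]
  rw [hswap, PySem.Dict.getD_foldl_modify_append]
  rw [PySem.Dict.getD_empty, List.nil_append, List.filter_map, List.map_map]
  rfl

theorem pvBuckets_keys (items : List (String × String)) :
    (items.foldl (fun d p => d.modify p.2 [] (fun l => l ++ [p.1])) PySem.Dict.empty).keys =
      PySem.Set.ofList (items.map (fun p => p.2)) := by
  rw [PySem.Dict.keys_foldl_modify_key items (fun p => p.2) [] (fun _ p l => l ++ [p.1])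
    PySem.Dict.empty]
  rw [PySem.Dict.keys_empty, PySem.Set.update_nil_left]

-- ---- sorted distinct values = dedup of the sorted value list ----
theorem pvVals_eq_dedup (items : List (String × String)) :
    PySem.List.sorted (PySem.Set.ofList (items.map (fun p => p.2))) (fun v => v) false =
      PySem.List.dedup ((PySem.List.sorted items (fun p => p.2) false).map (fun p => p.2)) := by
  set s := PySem.List.sorted items (fun p => p.2) false with hs
  have hperm : s.Perm items := PySem.List.sorted_perm items (fun p => p.2) false
  apply PySem.List.sorted_eq_of_perm_of_pairwise_lt
  · -- dedup (s.map .2) is a permutation of ofList (items.map .2)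
    apply (List.perm_ext_iff_of_nodup ?_ ?_).mpr
    · intro v
      rw [PySem.List.dedup_eq_ofList, PySem.Set.mem_ofList, PySem.Set.mem_ofList]
      exact (hperm.map (fun p => p.2)).mem_iff
    · rw [PySem.List.dedup_eq_ofList]; exact PySem.Set.nodup_ofList _
    · exact PySem.Set.nodup_ofList _
  · -- strictly increasing: a nodup sublist of a ≤-sorted list
    have hsub : List.Sublist (PySem.List.dedup (s.map (fun p => p.2))) (s.map (fun p => p.2)) :=
      pvDedup_sublist _
    have hle : (PySem.List.dedup (s.map (fun p => p.2))).Pairwise (fun a b => a ≤ b) :=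
      List.Pairwise.sublist hsub
        (by rw [hs]; exact PySem.List.sorted_map_key_pairwise items (fun p => p.2))
    have hnd : (PySem.List.dedup (s.map (fun p => p.2))).Nodup := by
      rw [PySem.List.dedup_eq_ofList]; exact PySem.Set.nodup_ofList _
    exact (hle.and hnd).imp (fun h => lt_of_le_of_ne h.1 h.2)

-- ===== VERDICT (by name: the statement is the Claim_ definition above) =====
theorem pvA_eq (od : List (String × String)) : label_duplicates_py od =
    (PySem.Dict.ofList (pvGLabel
      (PySem.List.sorted (PySem.Dict.ofList od).items (fun x => x.2) false))).items := by
  unfold label_duplicates_py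
  generalize PySem.List.sorted (PySem.Dict.ofList od).items (fun x => x.2) false = s
  cases s with
  | nil => simp only [pvGLabel, pvGroupRuns_nil, List.flatMap_nil]; rfl
  | cons x xs =>
    simp only []
    rw [pvFoldl_eq_labelCont (x :: xs) 0 x.2 1 [], List.nil_append, pvLabelCont_head x xs]

theorem label_duplicates_py_spec : Claim_equal_label_duplicates_py := by
  intro od _ _
  unfold Spec_label_duplicates_py
  rw [pvA_eq]
  simp only [label_duplicates_py_alt]
  congr 1
  rw [pvGLabel_sorted_aux
    (PySem.List.sorted (PySem.Dict.ofList od).items (fun x => x.2) false).length _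
    (le_refl _) (PySem.List.sorted_pairwise (PySem.Dict.ofList od).items (fun p => p.2))]
  rw [pvBuckets_keys, pvVals_eq_dedup]
  congr 1
  apply List.flatMap_congr
  intro v _
  rw [pvBuckets_getD, pvSorted_filter_stable]
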